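-- pv_equiv track=rewrite | github.com/fritzsedlazeck/Sniffles | src/sniffles/util.py | median_modes
-- ===== SOURCE A (Python) =====
-- def median_noavg(nums):
--     nums=sorted(list(nums))
--     mid=int(len(nums)/2)
--     return nums[mid]
--
-- def median_modes(nums):
--     max_count=0
--     counts={}
--     for n in nums:
--         if not n in counts:
--             counts[n]=1
--         else:
--             counts[n]+=1
--         max_count=max(max_count,counts[n])
--     return median_noavg(k for k,n in counts.items() if max_count-n<3 )
-- ===== SOURCE B (Python) =====
-- def median_modes(nums):
--     counts = {}
--     for n in nums:
--         counts[n] = counts.get(n, 0) + 1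
--     mx = max(counts.values())
--     modes = [k for k, c in counts.items() if c >= mx - 2]
--
--     def select(xs, k):
--         pivot = xs[len(xs) // 2]
--         lt = [x for x in xs if x < pivot]
--         if k < len(lt):
--             return select(lt, k)
--         if k == len(lt):
--             return pivot
--         return select([x for x in xs if x > pivot], k - len(lt) - 1)
--
--     return select(modes, len(modes) // 2)
-- ===== Notes on version B (the rewrite author's own statement) =====
-- stated objective: alternative
-- what changed: B counts with dict.get, takes max of the final counts instead of a running max, and replaces sort-then-index of the mode keys by a quickselect (recursive partition around a middle pivot) that finds the rank len//2 element directly.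
import Mathlib
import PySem

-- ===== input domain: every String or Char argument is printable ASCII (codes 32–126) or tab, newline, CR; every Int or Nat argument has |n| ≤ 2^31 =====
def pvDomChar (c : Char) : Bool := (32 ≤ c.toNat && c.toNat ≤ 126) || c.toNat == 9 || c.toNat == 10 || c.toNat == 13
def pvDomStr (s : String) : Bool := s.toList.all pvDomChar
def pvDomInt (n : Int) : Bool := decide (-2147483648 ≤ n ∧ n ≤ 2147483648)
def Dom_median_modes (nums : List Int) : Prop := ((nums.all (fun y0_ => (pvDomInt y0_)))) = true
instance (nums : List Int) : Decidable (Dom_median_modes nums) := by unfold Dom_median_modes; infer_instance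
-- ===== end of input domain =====

-- B replaces sort-then-index of the mode keys by a quickselect partition and takes the max of the
-- final counts instead of a running max; equivalence of return values is proved on nonempty inputs.

-- ===== PORT A =====

-- sorted(list(nums)); mid = int(len(nums)/2) = len // 2 since len is nonnegative;
-- nums[mid] raises IndexError on the empty list (excluded by Pre_), .getD 0 is the junk value there.
def median_noavg_port (nums : List Int) : Int :=
  let s := PySem.List.sorted nums (fun x => x) false
  let mid : Nat := s.length / 2
  (PySem.List.pyGet? s (mid : Int)).getD 0

-- the loop state is (counts, max_count); counts[n] after the update is (counts.getD n 0) of the new dict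
def median_modes (nums : List Int) : Int :=
  let st := nums.foldl
    (fun (st : PySem.Dict Int Int × Int) n =>
      let counts := if st.1.contains n = false then st.1.insert n 1
                    else st.1.insert n (st.1.getD n 0 + 1)
      (counts, max st.2 (counts.getD n 0)))
    (PySem.Dict.empty, 0)
  median_noavg_port ((st.1.items.filter (fun p => decide (st.2 - p.2 < 3))).map (fun p => p.1))

-- ===== PORT B =====

-- termination facts for selectGo (cited in its decreasing_by)
theorem attachFilterShorter {α : Type} (xs : List α) (p : {x // x ∈ xs} → Bool) (a : α)
    (ha : a ∈ xs) (hpa : p ⟨a, ha⟩ = false) : (xs.attach.filter p).length < xs.length := by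
  have h : (xs.attach.filter p).length < xs.attach.length :=
    List.length_filter_lt_length_iff_exists.mpr
      ⟨⟨a, ha⟩, List.mem_attach _ _, by simp [hpa]⟩
  simpa using h

theorem pivotMem (xs : List Int) (h : xs ≠ []) : xs.getD (xs.length / 2) 0 ∈ xs := by
  have hl : xs.length / 2 < xs.length := by
    have := List.length_pos_iff.mpr h; omega
  rw [List.getD_eq_getElem xs 0 hl]
  exact List.getElem_mem hl

-- quickselect: rank-k element of xs (distinct values), pivot = xs[len(xs)//2]
-- (Python's xs[...] on an empty xs raises; unreachable when k < xs.length — .getD 0 is junk there;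
--  the Python int k never goes negative, so Nat is exact)
def selectGo (xs : List Int) (k : Nat) : Int :=
  if k < (xs.filter (fun x => decide (x < xs.getD (xs.length / 2) 0))).length then
    selectGo (xs.filter (fun x => decide (x < xs.getD (xs.length / 2) 0))) k
  else if k = (xs.filter (fun x => decide (x < xs.getD (xs.length / 2) 0))).length then
    xs.getD (xs.length / 2) 0
  else
    selectGo (xs.filter (fun x => decide (xs.getD (xs.length / 2) 0 < x)))
      (k - (xs.filter (fun x => decide (x < xs.getD (xs.length / 2) 0))).length - 1)
termination_by (xs.length, k)
decreasing_by
  · rename_i hk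
    have hne : xs ≠ [] := by rintro rfl; simp at hk
    apply Prod.Lex.left
    simp only [List.length_unattach]
    exact attachFilterShorter xs _ _ (pivotMem xs hne) (by simp)
  · rename_i hk1 hk2
    by_cases hne : xs = []
    · subst hne
      simp only [List.attach_nil, List.filter_nil, List.unattach_nil, List.length_nil]
        at hk1 hk2 ⊢
      exact Prod.Lex.right _ (by omega)
    · apply Prod.Lex.left
      simp only [List.length_unattach]
      exact attachFilterShorter xs _ _ (pivotMem xs hne) (by simp)

def median_modes_alt (nums : List Int) : Int :=
  let counts := nums.foldl (fun (d : PySem.Dict Int Int) n => d.insert n (d.getD n 0 + 1))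
    PySem.Dict.empty
  -- max(counts.values()) raises ValueError on an empty dict (excluded by Pre_): .getD 0 is junk there
  let mx := (PySem.List.max? counts.values (fun v => v)).getD 0
  let modes := (counts.items.filter (fun p => decide (mx - 2 ≤ p.2))).map (fun p => p.1)
  selectGo modes (modes.length / 2)

-- ===== PRECONDITION & SPEC =====

-- On the empty list A raises IndexError (and B raises ValueError): excluded.
def Pre_median_modes (nums : List Int) : Prop := nums ≠ []
instance (nums : List Int) : Decidable (Pre_median_modes nums) := by unfold Pre_median_modes; infer_instance

def pvWitness_median_modes : List Int := [1, 2, 2, 3]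

def Spec_median_modes (nums : List Int) (out : Int) : Prop := out = median_modes_alt nums
instance (nums : List Int) (out : Int) : Decidable (Spec_median_modes nums out) := by unfold Spec_median_modes; infer_instance

-- ===== CLAIM (what is proved, stated in full; the proofs are below) =====
def Claim_equal_median_modes : Prop := ∀ (nums : List Int), Dom_median_modes nums → Pre_median_modes nums → Spec_median_modes nums (median_modes nums)

-- ===== LEMMAS AND PROOFS =====

-- ---- quickselect is the k-th element of the Python sort ----

theorem sorted_strict (l : List Int) (hnd : l.Nodup) :
    (PySem.List.sorted l (fun x => x) false).Pairwise (· < ·) := by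
  have h1 := PySem.List.sorted_pairwise l (fun x => x)
  have h2 : (PySem.List.sorted l (fun x => x) false).Nodup :=
    (PySem.List.sorted_perm l (fun x => x) false).nodup_iff.mpr hnd
  exact (h1.and h2).imp (fun h => lt_of_le_of_ne h.1 h.2)

theorem sorted_decomp (xs : List Int) (pivot : Int) (hnd : xs.Nodup) (hp : pivot ∈ xs) :
    PySem.List.sorted xs (fun x => x) false =
      PySem.List.sorted (xs.filter (fun x => decide (x < pivot))) (fun x => x) false
        ++ pivot :: PySem.List.sorted (xs.filter (fun x => decide (pivot < x))) (fun x => x) false := by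
  apply PySem.List.sorted_eq_of_perm_of_pairwise_lt
  · -- permutation
    have hlt := PySem.List.sorted_perm (xs.filter (fun x => decide (x < pivot))) (fun x => x) false
    have hgt := PySem.List.sorted_perm (xs.filter (fun x => decide (pivot < x))) (fun x => x) false
    refine (hlt.append (hgt.cons pivot)).trans ?_
    rw [List.perm_ext_iff_of_nodup]
    · intro a
      simp only [List.mem_append, List.mem_cons, List.mem_filter, decide_eq_true_eq]
      constructor
      · rintro ((⟨h, _⟩) | h | ⟨h, _⟩) <;> first | exact h | (subst h; exact hp)
      · intro ha
        rcases lt_trichotomy a pivot with h | h | h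
        · exact Or.inl ⟨ha, h⟩
        · exact Or.inr (Or.inl h)
        · exact Or.inr (Or.inr ⟨ha, h⟩)
    · refine List.Nodup.append (hnd.filter _) ((hnd.filter _).cons ?_) ?_
      · simp
      · intro a ha hb
        simp only [List.mem_filter, decide_eq_true_eq] at ha
        rcases List.mem_cons.mp hb with rfl | hb
        · exact absurd ha.2 (lt_irrefl a)
        · simp only [List.mem_filter, decide_eq_true_eq] at hb
          exact absurd (ha.2.trans hb.2) (lt_irrefl a)
    · exact hnd
  · -- strictly increasing
    rw [List.pairwise_append]
    refine ⟨sorted_strict _ (hnd.filter _), ?_, ?_⟩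
    · refine List.Pairwise.cons ?_ (sorted_strict _ (hnd.filter _))
      intro b hb
      have := (PySem.List.mem_sorted _ _ _ b).mp hb
      simp only [List.mem_filter, decide_eq_true_eq] at this
      exact this.2
    · intro a ha b hb
      have ha' := (PySem.List.mem_sorted _ _ _ a).mp ha
      simp only [List.mem_filter, decide_eq_true_eq] at ha'
      rcases List.mem_cons.mp hb with rfl | hb
      · exact ha'.2
      · have hb' := (PySem.List.mem_sorted _ _ _ b).mp hb
        simp only [List.mem_filter, decide_eq_true_eq] at hb'
        exact ha'.2.trans hb'.2

theorem selectGo_spec : ∀ (N : Nat) (xs : List Int) (k : Nat), xs.length ≤ N → xs.Nodup →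
    k < xs.length →
    selectGo xs k = ((PySem.List.sorted xs (fun x => x) false)[k]?).getD 0 := by
  intro N
  induction N with
  | zero => intro xs k hN _ hk; omega
  | succ N ih =>
    intro xs k hN hnd hk
    have hne : xs ≠ [] := by rintro rfl; simp at hk
    set pivot := xs.getD (xs.length / 2) 0 with hpiv
    have hpm : pivot ∈ xs := pivotMem xs hne
    set lt := xs.filter (fun x => decide (x < pivot)) with hltdef
    set gt := xs.filter (fun x => decide (pivot < x)) with hgtdef
    have hdec := sorted_decomp xs pivot hnd hpm
    rw [← hltdef, ← hgtdef] at hdec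
    have hlenlt : (PySem.List.sorted lt (fun x => x) false).length = lt.length :=
      PySem.List.length_sorted _ _ _
    have hlensum : xs.length = lt.length + 1 + gt.length := by
      have hperm : (lt ++ pivot :: gt).Perm xs := by
        have h0 := (PySem.List.sorted_perm xs (fun x => x) false).symm
        rw [hdec] at h0
        exact ((PySem.List.sorted_perm lt (fun x => x) false).symm.append
          ((PySem.List.sorted_perm gt (fun x => x) false).symm.cons pivot)).trans h0.symm
      have := hperm.length_eq
      simp at this
      omega
    rw [selectGo]
    by_cases h1 : k < lt.length
    · rw [if_pos (by rw [← hpiv, ← hltdef]; exact h1)]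
      rw [← hpiv, ← hltdef]
      rw [ih lt k (by omega) (hnd.filter _) h1, hdec]
      rw [List.getElem?_append_left (by rw [hlenlt]; exact h1)]
    · rw [if_neg (by rw [← hpiv, ← hltdef]; exact h1)]
      by_cases h2 : k = lt.length
      · rw [if_pos (by rw [← hpiv, ← hltdef]; exact h2)]
        rw [hdec, List.getElem?_append_right (by rw [hlenlt]; omega)]
        rw [hlenlt, h2]
        simp
        rw [hpiv, List.getD_eq_getElem?_getD]
      · rw [if_neg (by rw [← hpiv, ← hltdef]; exact h2)]
        rw [← hpiv, ← hltdef, ← hgtdef]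
        have hk' : k - lt.length - 1 < gt.length := by omega
        rw [ih gt (k - lt.length - 1) (by omega) (hnd.filter _) hk', hdec]
        rw [List.getElem?_append_right (by rw [hlenlt]; omega)]
        have hidx : k - (PySem.List.sorted lt (fun x => x) false).length
            = (k - lt.length - 1) + 1 := by rw [hlenlt]; omega
        rw [hidx, List.getElem?_cons_succ]

-- ---- A's running max equals the max of the final counts ----

def MaxSpec (l : List Int) (mc : Int) : Prop :=
  (∀ k ∈ l, (l.count k : Int) ≤ mc) ∧ (l = [] → mc = 0) ∧ (l ≠ [] → ∃ k ∈ l, (l.count k : Int) = mc)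

theorem maxSpec_step (l : List Int) (mc : Int) (n : Int) (h : MaxSpec l mc) :
    MaxSpec (l ++ [n]) (max mc ((l.count n : Int) + 1)) := by
  obtain ⟨hub, hnil, hex⟩ := h
  have hcnt_ne : ∀ k : Int, k ≠ n → (l ++ [n]).count k = l.count k := by
    intro k hkn
    have hnk : ¬ n = k := fun h' => hkn h'.symm
    simp [List.count_append, hnk]
  have hcnt_n : (l ++ [n]).count n = l.count n + 1 := by simp
  refine ⟨?_, by simp, fun _ => ?_⟩
  · intro k hk
    by_cases hkn : k = n
    · subst hkn
      rw [hcnt_n]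
      push_cast
      exact le_max_of_le_right (by omega)
    · have hkl : k ∈ l := by
        rcases List.mem_append.mp hk with h | h
        · exact h
        · simp at h; exact absurd h hkn
      rw [hcnt_ne k hkn]
      exact le_max_of_le_left (hub k hkl)
  · rcases le_total mc ((l.count n : Int) + 1) with hle | hle
    · refine ⟨n, by simp, ?_⟩
      rw [hcnt_n, max_eq_right hle]
      push_cast
      ring
    · by_cases hl : l = []
      · exfalso
        subst hl
        have h0 := hnil rfl
        simp at hle
        omega
      · obtain ⟨k, hkl, hkc⟩ := hex hl
        have hkn : k ≠ n := by
          rintro rfl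
          omega
        refine ⟨k, List.mem_append_left _ hkl, ?_⟩
        rw [hcnt_ne k hkn, hkc, max_eq_left hle]

-- A's loop: the dict component is the same insert-counting fold as B's
theorem foldA_fst (l : List Int) (st : PySem.Dict Int Int × Int) :
    (l.foldl
      (fun (st : PySem.Dict Int Int × Int) n =>
        let counts := if st.1.contains n = false then st.1.insert n 1
                      else st.1.insert n (st.1.getD n 0 + 1)
        (counts, max st.2 (counts.getD n 0)))
      st).1 = l.foldl (fun d n => d.insert n (d.getD n 0 + 1)) st.1 := by
  induction l generalizing st with
  | nil => rfl
  | cons n t ih =>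
    rw [List.foldl_cons, List.foldl_cons, ih]
    congr 1
    by_cases hc : st.1.contains n = false
    · rw [if_pos hc, PySem.Dict.getD_of_not_contains st.1 0 hc]
      norm_num
    · rw [if_neg hc]

theorem foldA_snd (l : List Int) :
    MaxSpec l (l.foldl
      (fun (st : PySem.Dict Int Int × Int) n =>
        let counts := if st.1.contains n = false then st.1.insert n 1
                      else st.1.insert n (st.1.getD n 0 + 1)
        (counts, max st.2 (counts.getD n 0)))
      (PySem.Dict.empty, 0)).2 := by
  induction l using List.reverseRecOn with
  | nil => exact ⟨by simp, fun _ => rfl, by simp⟩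
  | append_singleton l n ih =>
    rw [List.foldl_append, List.foldl_cons, List.foldl_nil]
    set st := l.foldl
      (fun (st : PySem.Dict Int Int × Int) n =>
        let counts := if st.1.contains n = false then st.1.insert n 1
                      else st.1.insert n (st.1.getD n 0 + 1)
        (counts, max st.2 (counts.getD n 0)))
      (PySem.Dict.empty, 0) with hst
    have hfst : st.1 = PySem.Dict.counter l := by
      rw [hst, foldA_fst]
      exact PySem.Dict.foldl_insert_getD_add_one_eq_counter l
    have hgd : (if st.1.contains n = false then st.1.insert n 1
        else st.1.insert n (st.1.getD n 0 + 1)).getD n 0 = (l.count n : Int) + 1 := by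
      by_cases hc : st.1.contains n = false
      · rw [if_pos hc, PySem.Dict.getD_insert_self]
        have h0 := PySem.Dict.getD_of_not_contains st.1 (0 : Int) hc
        rw [hfst, PySem.Dict.getD_counter] at h0
        omega
      · rw [if_neg hc, PySem.Dict.getD_insert_self, hfst, PySem.Dict.getD_counter]
    simp only [hgd]
    exact maxSpec_step l st.2 n ih

-- the max of the final counter's values satisfies the same spec, hence equals A's running max
theorem max_eq_of_specs (nums : List Int) (hne : nums ≠ []) (mc : Int) (hspec : MaxSpec nums mc) :
    (PySem.List.max? (PySem.Dict.counter nums).values (fun v => v)).getD 0 = mc := by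
  have hvals : (PySem.Dict.counter nums).values =
      (PySem.Set.ofList nums).map (fun k => (nums.count k : Int)) := by
    simp only [PySem.Dict.values, PySem.Dict.items_counter, List.map_map]
    rfl
  have hvne : (PySem.Dict.counter nums).values ≠ [] := by
    rw [hvals]
    simp only [ne_eq, List.map_eq_nil_iff]
    intro h
    obtain ⟨a, ha⟩ := List.exists_mem_of_ne_nil nums hne
    have := (PySem.Set.mem_ofList nums a).mpr ha
    rw [h] at this
    simp at this
  obtain ⟨m, hm⟩ : ∃ m, PySem.List.max? (PySem.Dict.counter nums).values (fun v => v) = some m := by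
    rcases hmax : PySem.List.max? (PySem.Dict.counter nums).values (fun v => v) with _ | m
    · exact absurd ((PySem.List.max?_eq_none_iff _ _).mp hmax) hvne
    · exact ⟨m, rfl⟩
  rw [hm, Option.getD_some]
  have hmem := PySem.List.max?_mem hm
  have hmax := PySem.List.max?_isMax hm
  rw [hvals] at hmem hmax
  obtain ⟨k, hk, hkm⟩ := List.mem_map.mp hmem
  rw [PySem.Set.mem_ofList] at hk
  obtain ⟨hub, _, hex⟩ := hspec
  obtain ⟨j, hj, hjc⟩ := hex hne
  have h1 : m ≤ mc := hkm ▸ hub k hk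
  have h2 : mc ≤ m := by
    have := hmax ((nums.count j : Int))
      (List.mem_map.mpr ⟨j, (PySem.Set.mem_ofList nums j).mpr hj, rfl⟩)
    simpa [hjc] using this
  omega

-- ===== VERDICT (by name: the statement is the Claim_ definition above) =====
theorem median_modes_spec : Claim_equal_median_modes := by
  intro nums _ hne
  unfold Spec_median_modes
  simp only [median_modes, median_modes_alt, median_noavg_port]
  rw [PySem.Dict.foldl_insert_getD_add_one_eq_counter nums]
  set st := nums.foldl
    (fun (st : PySem.Dict Int Int × Int) n =>
      let counts := if st.1.contains n = false then st.1.insert n 1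
                    else st.1.insert n (st.1.getD n 0 + 1)
      (counts, max st.2 (counts.getD n 0)))
    (PySem.Dict.empty, 0) with hst
  have hfst : st.1 = PySem.Dict.counter nums := by
    rw [hst, foldA_fst]
    exact PySem.Dict.foldl_insert_getD_add_one_eq_counter nums
  have hms : MaxSpec nums st.2 := foldA_snd nums
  have hmx : (PySem.List.max? (PySem.Dict.counter nums).values (fun v => v)).getD 0 = st.2 :=
    max_eq_of_specs nums hne st.2 hms
  rw [hmx, hfst]
  have hfilt : (PySem.Dict.counter nums).items.filter (fun p => decide (st.2 - 2 ≤ p.2))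
      = (PySem.Dict.counter nums).items.filter (fun p => decide (st.2 - p.2 < 3)) :=
    List.filter_congr (fun p _ => by simp only [decide_eq_decide]; omega)
  rw [hfilt]
  set modes := ((PySem.Dict.counter nums).items.filter
    (fun p => decide (st.2 - p.2 < 3))).map (fun p => p.1) with hmodes
  -- modes is a filter of the distinct keys
  have hmodes' : modes = (PySem.Set.ofList nums).filter
      (fun k => decide (st.2 - (nums.count k : Int) < 3)) := by
    rw [hmodes, PySem.Dict.items_counter, List.filter_map, List.map_map]
    simp [Function.comp_def]
  have hnd : modes.Nodup := by
    rw [hmodes']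
    exact (PySem.Set.nodup_ofList nums).filter _
  have hmne : modes ≠ [] := by
    obtain ⟨j, hj, hjc⟩ := hms.2.2 hne
    rw [hmodes']
    intro h
    have hjm : j ∈ (PySem.Set.ofList nums).filter
        (fun k => decide (st.2 - (nums.count k : Int) < 3)) := by
      rw [List.mem_filter]
      exact ⟨(PySem.Set.mem_ofList nums j).mpr hj, by rw [hjc]; simp⟩
    rw [h] at hjm
    simp at hjm
  have hmid : modes.length / 2 < modes.length := by
    have : 0 < modes.length := List.length_pos_iff.mpr hmne
    omega
  rw [selectGo_spec modes.length modes (modes.length / 2) le_rfl hnd hmid]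
  rw [PySem.List.length_sorted, PySem.List.pyGet?_natCast]
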